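-- pv_equiv track=rewrite | github.com/snumrl/Splines | interpolatory.py | numLatentPoints
-- ===== SOURCE A (Python) =====
-- def numLatentPoints( num, level, closed ):
--     yield 0   # No latent control points
--
--     if num>3:
--         n = num
--         for i in range(level):
--             if closed:
--                 n = 2*n
--             else:
--                 n = 2*n - 1
--         yield n
--     else:
--         yield 0
-- ===== SOURCE B (Python) =====
-- def numLatentPoints(num, level, closed):
--     yield 0   # No latent control points
--     if num <= 3:
--         yield 0
--     else:
--         e = level if level > 0 else 0
--         yield num * 2**e if closed else (num - 1) * 2**e + 1
-- ===== Notes on version B (the rewrite author's own statement) =====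
-- stated objective: simpler
-- what changed: Replaces the level-step doubling loop with a closed-form formula: num*2^e when closed, (num-1)*2^e+1 when open, with e = max(level, 0).
import Mathlib
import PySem

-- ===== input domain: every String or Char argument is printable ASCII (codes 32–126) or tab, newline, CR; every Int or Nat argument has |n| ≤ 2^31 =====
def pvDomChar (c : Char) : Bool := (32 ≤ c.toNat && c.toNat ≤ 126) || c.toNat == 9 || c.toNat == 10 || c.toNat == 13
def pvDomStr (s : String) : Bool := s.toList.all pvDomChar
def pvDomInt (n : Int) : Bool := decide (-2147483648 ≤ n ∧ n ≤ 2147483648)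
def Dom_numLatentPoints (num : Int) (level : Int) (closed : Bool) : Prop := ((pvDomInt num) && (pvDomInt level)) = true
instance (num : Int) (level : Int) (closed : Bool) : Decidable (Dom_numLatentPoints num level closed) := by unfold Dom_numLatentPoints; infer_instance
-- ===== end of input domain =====

-- ===== PORT A =====
-- generator collected as a list: yield 0; then if num>3 run the doubling loop over range(level); else yield 0
def numLatentPoints (num : Int) (level : Int) (closed : Bool) : List Int :=
  0 ::
    (if num > 3 then
      [(PySem.List.pyRange 0 level 1).foldl
        (fun n _ => if closed then 2 * n else 2 * n - 1) num]
    else [0])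

-- ===== PORT B =====
-- B: closed-form value instead of the loop (simpler; e = max(level, 0))
def numLatentPoints_alt (num : Int) (level : Int) (closed : Bool) : List Int :=
  0 ::
    (if num ≤ 3 then [0]
    else
      let e : Nat := (if level > 0 then level else 0).toNat
      [if closed then num * 2 ^ e else (num - 1) * 2 ^ e + 1])

-- ===== PRECONDITION & SPEC =====
def Spec_numLatentPoints (num : Int) (level : Int) (closed : Bool) (out : List Int) : Prop := out = numLatentPoints_alt num level closed
instance (num : Int) (level : Int) (closed : Bool) (out : List Int) : Decidable (Spec_numLatentPoints num level closed out) := by unfold Spec_numLatentPoints; infer_instance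

-- ===== CLAIM (what is proved, stated in full; the proofs are below) =====
def Claim_equal_numLatentPoints : Prop := ∀ (num : Int) (level : Int) (closed : Bool), Dom_numLatentPoints num level closed → Spec_numLatentPoints num level closed (numLatentPoints num level closed)

-- ===== LEMMAS AND PROOFS =====

-- ===== VERDICT (by name: the statement is the Claim_ definition above) =====
lemma foldl_double (l : List Int) (n : Int) :
    l.foldl (fun m _ => 2 * m) n = n * 2 ^ l.length := by
  induction l generalizing n with
  | nil => simp
  | cons a t ih => simp [List.foldl, ih]; ring

lemma foldl_double_open (l : List Int) (n : Int) :
    l.foldl (fun m _ => 2 * m - 1) n = (n - 1) * 2 ^ l.length + 1 := by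
  induction l generalizing n with
  | nil => simp
  | cons a t ih => simp [List.foldl, ih]; ring

-- ===== VERDICT (by name: the statement is the Claim_ definition above) =====
theorem numLatentPoints_spec : Claim_equal_numLatentPoints := by
  intro num level closed _
  unfold Spec_numLatentPoints numLatentPoints numLatentPoints_alt
  by_cases h : num > 3
  · have hn : ¬ num ≤ 3 := by omega
    have hlen : (PySem.List.pyRange 0 level 1).length = level.toNat := by
      simp [PySem.List.length_pyRange_one]
    have he : (if level > 0 then level else 0).toNat = level.toNat := by
      split_ifs with hl <;> omega
    cases closed <;>
      simp [h, hn, foldl_double, foldl_double_open, hlen, he]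
  · have hn : num ≤ 3 := by omega
    simp [h, hn]
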